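-- pv_equiv track=rewrite | github.com/hghyhghy/Codechef-Coding-Ninja | Desktop/DSA/T26/9.py | finding_the_duplicates
-- ===== SOURCE A (Python) =====
-- def finding_the_duplicates(arr):
--
--     freq={}
--
--     for num in arr:
--
--         if num in freq:
--
--             freq[num] += 1
--
--         else:
--
--             freq[num] = 1
--
--     for num,count in freq.items():
--
--         if count > 1:
--
--             return num
--
--
--     return None
-- ===== SOURCE B (Python) =====
-- def finding_the_duplicates(arr):
--     for x in arr:
--         if arr.count(x) > 1:
--             return x
--     return None
-- ===== Notes on version B (the rewrite author's own statement) =====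
-- stated objective: simpler
-- what changed: Drops the frequency dictionary entirely: B scans arr in order and returns the first element whose count in arr exceeds 1, relying on the fact that dict insertion order equals first-occurrence order.
import Mathlib
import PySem

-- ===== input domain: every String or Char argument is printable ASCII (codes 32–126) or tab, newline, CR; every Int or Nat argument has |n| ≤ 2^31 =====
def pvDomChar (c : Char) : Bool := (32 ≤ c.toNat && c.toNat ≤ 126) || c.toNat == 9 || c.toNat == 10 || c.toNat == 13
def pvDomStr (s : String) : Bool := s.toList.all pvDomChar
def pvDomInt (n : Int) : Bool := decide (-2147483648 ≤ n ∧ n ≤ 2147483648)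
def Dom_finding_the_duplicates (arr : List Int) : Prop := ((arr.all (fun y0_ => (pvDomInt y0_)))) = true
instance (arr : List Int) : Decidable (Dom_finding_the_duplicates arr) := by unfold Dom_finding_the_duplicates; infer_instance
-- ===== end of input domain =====

-- B drops A's frequency dictionary: it returns the first element of arr whose count in arr exceeds 1
-- (objective: simpler; same return value — A's first dict key with count > 1 is that same element).


-- ===== PORT A =====
-- second loop of A: 'for num, count in freq.items(): if count > 1: return num'
def pvItemsLoop (items : List (Int × Int)) : Option Int :=
  match items with
  | [] => none
  | (num, count) :: rest => if count > 1 then some num else pvItemsLoop rest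

def finding_the_duplicates (arr : List Int) : Option Int :=
  let freq : PySem.Dict Int Int :=
    arr.foldl (fun d num =>
      if d.contains num then d.insert num (d.getD num 0 + 1) else d.insert num 1)
      PySem.Dict.empty
  pvItemsLoop freq.items

-- ===== PORT B =====
-- 'for x in arr: if arr.count(x) > 1: return x'
def pvAltLoop (arr : List Int) (rem : List Int) : Option Int :=
  match rem with
  | [] => none
  | x :: rest => if ((PySem.List.count arr x : Int)) > 1 then some x else pvAltLoop arr rest

def finding_the_duplicates_alt (arr : List Int) : Option Int :=
  pvAltLoop arr arr

-- ===== PRECONDITION & SPEC =====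
def Spec_finding_the_duplicates (arr : List Int) (out : Option Int) : Prop := out = finding_the_duplicates_alt arr
instance (arr : List Int) (out : Option Int) : Decidable (Spec_finding_the_duplicates arr out) := by unfold Spec_finding_the_duplicates; infer_instance

-- ===== CLAIM (what is proved, stated in full; the proofs are below) =====
def Claim_equal_finding_the_duplicates : Prop := ∀ (arr : List Int), Dom_finding_the_duplicates arr → Spec_finding_the_duplicates arr (finding_the_duplicates arr)

-- ===== LEMMAS AND PROOFS =====

-- A's building loop is Counter(arr): the 'contains' branch split collapses into insert (getD + 1)
theorem pv_freq_eq_counter (arr : List Int) :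
    arr.foldl (fun d num =>
      if d.contains num then d.insert num (d.getD num 0 + 1) else d.insert num 1)
      PySem.Dict.empty = PySem.Dict.counter arr := by
  rw [← PySem.Dict.foldl_insert_getD_add_one_eq_counter]
  apply PySem.List.foldl_congr_mem
  intro d num _
  by_cases h : d.contains num = true
  · simp [h]
  · simp only [Bool.not_eq_true] at h
    simp [h, PySem.Dict.getD_of_not_contains]

-- A's second loop over items built as (k, c k) finds the first key with c k > 1
theorem pv_itemsLoop_map (c : Int → Int) (l : List Int) :
    pvItemsLoop (l.map (fun k => (k, c k))) = l.find? (fun k => decide (c k > 1)) := by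
  induction l with
  | nil => rfl
  | cons x t ih =>
    simp only [List.map_cons, pvItemsLoop, List.find?]
    by_cases h : c x > 1
    · simp [h]
    · simp [h, ih]

-- the first match in set(arr) (first-occurrence order) is the first match in arr
theorem pv_find?_ofList (p : Int → Bool) (l : List Int) :
    (PySem.Set.ofList l).find? p = l.find? p := by
  induction l with
  | nil => rfl
  | cons x t ih =>
    rw [PySem.Set.ofList_cons]
    simp only [List.find?]
    by_cases h : p x = true
    · simp [h]
    · simp only [Bool.not_eq_true] at h
      simp only [h, ih.symm]
      -- discard removes only copies of x, and p x = false, so find? is unchanged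
      have hd : PySem.Set.discard (PySem.Set.ofList t) x
          = (PySem.Set.ofList t).filter (fun y => !(y == x)) := by
        simp [PySem.Set.discard]
      rw [hd]
      induction PySem.Set.ofList t with
      | nil => rfl
      | cons y s ihs =>
        by_cases hyx : y = x
        · subst hyx
          have hb : (y == y) = true := by simp
          simp only [List.filter_cons, hb, Bool.not_true, Bool.false_eq_true, if_false, ihs,
            List.find?, h]
        · have hb : (y == x) = false := by simp [hyx]
          simp only [List.filter_cons, hb, Bool.not_false, if_true, List.find?]
          by_cases hp : p y = true
          · simp [hp]
          · simp only [Bool.not_eq_true] at hp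
            simp [hp, ihs]

-- B's loop is find? with the count test
theorem pv_altLoop_eq_find? (arr l : List Int) :
    pvAltLoop arr l = l.find? (fun x => decide ((PySem.List.count arr x : Int) > 1)) := by
  induction l with
  | nil => rfl
  | cons x t ih =>
    rw [pvAltLoop, List.find?]
    by_cases h : ((PySem.List.count arr x : Int)) > 1
    · rw [if_pos h, decide_eq_true h]
    · rw [if_neg h, decide_eq_false h, ih]

-- ===== VERDICT (by name: the statement is the Claim_ definition above) =====
theorem finding_the_duplicates_spec : Claim_equal_finding_the_duplicates := by
  intro arr _
  unfold Spec_finding_the_duplicates finding_the_duplicates_alt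
  show pvItemsLoop ((arr.foldl (fun d num =>
      if d.contains num then d.insert num (d.getD num 0 + 1) else d.insert num 1)
      PySem.Dict.empty).items) = pvAltLoop arr arr
  rw [pv_freq_eq_counter, PySem.Dict.items_counter, pv_itemsLoop_map, pv_find?_ofList,
    pv_altLoop_eq_find?]
  simp only [PySem.List.count_eq]
  rfl
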